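-- pv_equiv track=rewrite | github.com/nimradev064/Real-Time-Stream-Detection-Dashboard | app.py | calculate_counts_events_dashboard
-- ===== SOURCE A (Python) =====
-- def calculate_counts_events_dashboard(timestamps, events):
--     event_counts = {}
--     for i in range(len(timestamps)):
--         timestamp = timestamps[i]
--         if timestamp not in event_counts:
--             event_counts[timestamp] = 0
--         event_counts[timestamp] += 1 if events[i] else 0
--
--     return event_counts
-- ===== SOURCE B (Python) =====
-- def calculate_counts_events_dashboard(timestamps, events):
--     groups = {}
--     for t, e in zip(timestamps, events):
--         groups.setdefault(t, []).append(e)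
--     return {t: sum(g) for t, g in groups.items()}
-- ===== Notes on version B (the rewrite author's own statement) =====
-- stated objective: alternative
-- what changed: B groups instead of counting: a first pass collects the per-timestamp lists of event flags in a dict of lists (setdefault/append over the zipped pairs), then a comprehension over the grouped items sums each list's truthy flags, where A maintains running integer counts in a single combined dict pass.
import Mathlib
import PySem

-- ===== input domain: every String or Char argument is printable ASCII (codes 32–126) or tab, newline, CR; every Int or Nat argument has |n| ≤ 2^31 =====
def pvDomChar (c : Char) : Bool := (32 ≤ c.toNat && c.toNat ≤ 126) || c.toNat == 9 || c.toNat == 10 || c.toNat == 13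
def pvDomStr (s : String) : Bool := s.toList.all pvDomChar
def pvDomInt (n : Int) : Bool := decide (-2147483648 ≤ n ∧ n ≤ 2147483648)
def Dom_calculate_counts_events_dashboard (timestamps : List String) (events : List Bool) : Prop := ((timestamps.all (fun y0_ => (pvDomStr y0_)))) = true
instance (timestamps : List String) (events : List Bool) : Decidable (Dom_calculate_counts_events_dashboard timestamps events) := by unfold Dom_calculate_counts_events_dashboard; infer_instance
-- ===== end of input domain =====

-- B groups instead of counting: one pass collects the per-timestamp lists of event flags in a
-- dict of lists, then a second pass sums each list's truthy flags, where A maintains running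
-- integer counts in a single combined dict pass (objective: alternative).

-- ===== PORT A =====
def calculate_counts_events_dashboard (timestamps : List String) (events : List Bool) : List (String × Int) :=
  (List.foldl (fun event_counts i =>
      let timestamp := PySem.List.pyGetD timestamps i ""
      let event_counts :=
        if !event_counts.contains timestamp then event_counts.insert timestamp 0 else event_counts
      event_counts.insert timestamp
        (event_counts.getD timestamp 0 + (if PySem.List.pyGetD events i false then 1 else 0)))
    PySem.Dict.empty
    (PySem.List.pyRange 0 (timestamps.length : Int) 1)).items

-- ===== PORT B =====
def calculate_counts_events_dashboard_alt (timestamps : List String) (events : List Bool) : List (String × Int) :=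
  let groups := (timestamps.zip events).foldl       -- groups.setdefault(t, []).append(e)
      (fun d p => d.modify p.1 [] (· ++ [p.2]))
      (PySem.Dict.empty : PySem.Dict String (List Bool))
  groups.items.map (fun g =>                        -- {t: sum(g) for t, g in groups.items()}
    (g.1, g.2.foldl (fun acc e => acc + (if e then (1 : Int) else 0)) 0))

-- ===== PRECONDITION & SPEC =====
-- A reads events[i] for every i < len(timestamps) and raises IndexError when events is shorter
-- than timestamps; exactly those inputs are excluded.
def Pre_calculate_counts_events_dashboard (timestamps : List String) (events : List Bool) : Prop :=
  timestamps.length ≤ events.length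
instance (timestamps : List String) (events : List Bool) : Decidable (Pre_calculate_counts_events_dashboard timestamps events) := by unfold Pre_calculate_counts_events_dashboard; infer_instance

def pvWitness_calculate_counts_events_dashboard : List String × List Bool :=
  (["a", "b", "a"], [true, false, true])

def Spec_calculate_counts_events_dashboard (timestamps : List String) (events : List Bool) (out : List (String × Int)) : Prop := out = calculate_counts_events_dashboard_alt timestamps events
instance (timestamps : List String) (events : List Bool) (out : List (String × Int)) : Decidable (Spec_calculate_counts_events_dashboard timestamps events out) := by unfold Spec_calculate_counts_events_dashboard; infer_instance

-- ===== CLAIM (what is proved, stated in full; the proofs are below) =====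
def Claim_equal_calculate_counts_events_dashboard : Prop := ∀ (timestamps : List String) (events : List Bool), Dom_calculate_counts_events_dashboard timestamps events → Pre_calculate_counts_events_dashboard timestamps events → Spec_calculate_counts_events_dashboard timestamps events (calculate_counts_events_dashboard timestamps events)

-- ===== LEMMAS AND PROOFS =====

-- Index loop over two parallel lists = fold over their zip (when the second list is long enough).
theorem pv_foldl_range_zip {α β δ : Type} (f : δ → α → β → δ) (da : α) (db : β) :
    ∀ (ts : List α) (es : List β), ts.length ≤ es.length → ∀ (init : δ),
      List.foldl (fun d k => f d (ts.getD k da) (es.getD k db)) init (List.range ts.length)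
        = List.foldl (fun d p => f d p.1 p.2) init (ts.zip es) := by
  intro ts
  induction ts with
  | nil => intro es h init; simp
  | cons a ts ih =>
    intro es h init
    cases es with
    | nil => simp at h
    | cons b es =>
      simp only [List.length_cons, List.range_succ_eq_map, List.foldl_cons, List.foldl_map,
        List.getD_cons_zero, Nat.succ_eq_add_one, List.getD_cons_succ, List.zip_cons_cons]
      exact ih es (by simpa using h) (f init a b)

-- The pyRange/pyGetD loop is the Nat-range loop.
theorem pv_foldl_pyRange_two {α β δ : Type} (f : δ → α → β → δ) (da : α) (db : β)
    (ts : List α) (es : List β) (init : δ) :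
    List.foldl (fun d i => f d (PySem.List.pyGetD ts i da) (PySem.List.pyGetD es i db)) init
        (PySem.List.pyRange 0 (ts.length : Int) 1)
      = List.foldl (fun d k => f d (ts.getD k da) (es.getD k db)) init (List.range ts.length) := by
  rw [PySem.List.pyRange_one, List.foldl_map]
  simp [PySem.List.pyGetD_natCast]

-- A's loop body (conditional zero-insert followed by +=) is a single insert.
theorem pv_stepA_eq (d : PySem.Dict String Int) (t : String) (e : Bool) :
    (let d1 := if !d.contains t then d.insert t 0 else d
     d1.insert t (d1.getD t 0 + (if e then 1 else 0)))
    = d.insert t (d.getD t 0 + (if e then 1 else 0)) := by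
  by_cases h : d.contains t = true
  · simp [h]
  · simp only [Bool.not_eq_true] at h
    simp [h, PySem.Dict.getD_insert_self, PySem.Dict.insert_insert_self,
      PySem.Dict.getD_of_not_contains d _ h]

-- Value after A's counting loop: old value plus the number of matching truthy pairs.
theorem pv_getD_foldl_stepA (l : List (String × Bool)) :
    ∀ (d : PySem.Dict String Int) (t : String),
      (l.foldl (fun d p => d.insert p.1 (d.getD p.1 0 + (if p.2 then 1 else 0))) d).getD t 0
        = d.getD t 0 + (l.countP (fun p => p.1 == t && p.2) : Int) := by
  induction l with
  | nil => intro d t; simp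
  | cons p l ih =>
    intro d t
    rw [List.foldl_cons, ih, PySem.Dict.getD_insert, List.countP_cons]
    by_cases ht : t = p.1
    · subst ht
      by_cases he : p.2 = true
      · simp [he]; ring
      · simp [he]
    · have : (p.1 == t) = false := by simpa using Ne.symm ht
      simp [ht, this]

-- B's sum over a list of flags is its truthy count.
theorem pv_sum_eq_countP (bs : List Bool) :
    ∀ (acc : Int),
      bs.foldl (fun acc e => acc + (if e then (1 : Int) else 0)) acc
        = acc + (bs.countP (fun e => e) : Int) := by
  induction bs with
  | nil => intro acc; simp
  | cons e bs ih =>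
    intro acc
    rw [List.foldl_cons, List.countP_cons, ih]
    by_cases he : e = true
    · simp [he]; ring
    · simp [he]

-- Main equivalence: both sides equal (ofList ts).map (t ↦ (t, count of matching truthy pairs)).
theorem pv_main (ts : List String) (es : List Bool) (h : ts.length ≤ es.length) :
    calculate_counts_events_dashboard ts es = calculate_counts_events_dashboard_alt ts es := by
  have hstep : (fun (d : PySem.Dict String Int) (p : String × Bool) =>
      (let d1 := if !d.contains p.1 then d.insert p.1 0 else d
       d1.insert p.1 (d1.getD p.1 0 + (if p.2 then 1 else 0))))
      = fun d p => d.insert p.1 (d.getD p.1 0 + (if p.2 then 1 else 0)) :=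
    funext fun d => funext fun p => pv_stepA_eq d p.1 p.2
  have eA : List.foldl (fun (d : PySem.Dict String Int) (i : Int) =>
        (let t := PySem.List.pyGetD ts i ""
         let d1 := if !d.contains t then d.insert t 0 else d
         d1.insert t (d1.getD t 0 + (if PySem.List.pyGetD es i false then 1 else 0))))
        PySem.Dict.empty (PySem.List.pyRange 0 (ts.length : Int) 1)
      = List.foldl (fun d p => d.insert p.1 (d.getD p.1 0 + (if p.2 then 1 else 0)))
        PySem.Dict.empty (ts.zip es) := by
    rw [← hstep]
    exact (pv_foldl_pyRange_two
        (fun (d : PySem.Dict String Int) (t : String) (e : Bool) =>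
                      (let d1 := if !d.contains t then d.insert t 0 else d
                       d1.insert t (d1.getD t 0 + (if e then 1 else 0)))) "" false ts es _).trans
      (pv_foldl_range_zip
        (fun (d : PySem.Dict String Int) (t : String) (e : Bool) =>
                      (let d1 := if !d.contains t then d.insert t 0 else d
                       d1.insert t (d1.getD t 0 + (if e then 1 else 0)))) "" false ts es h _)
  set l := ts.zip es with hl
  have hmapfst : l.map Prod.fst = ts := List.map_fst_zip h
  set dA := l.foldl (fun d p => d.insert p.1 (d.getD p.1 0 + (if p.2 then 1 else 0)))
      (PySem.Dict.empty : PySem.Dict String Int) with hdA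
  have hkA : dA.keys = PySem.Set.ofList ts := by
    rw [hdA, PySem.Dict.keys_foldl_insert_key l Prod.fst, hmapfst, PySem.Dict.keys_empty]
    rfl
  have hndA : dA.keys.Nodup :=
    PySem.Dict.nodup_keys_foldl_insert_key l Prod.fst _ _ PySem.Dict.nodup_keys_empty
  have hgA : ∀ t, dA.getD t 0 = (l.countP (fun p => p.1 == t && p.2) : Int) := by
    intro t
    rw [hdA, pv_getD_foldl_stepA, PySem.Dict.getD_empty, zero_add]
  calc calculate_counts_events_dashboard ts es
      = dA.items := by
        unfold calculate_counts_events_dashboard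
        rw [eA]
    _ = dA.keys.map (fun t => (t, dA.getD t 0)) := PySem.Dict.items_eq_map_keys dA hndA 0
    _ = (PySem.Set.ofList ts).map
          (fun t => (t, (l.countP (fun p => p.1 == t && p.2) : Int))) := by
        rw [hkA]
        exact List.map_congr_left (fun t _ => by rw [hgA])
    _ = calculate_counts_events_dashboard_alt ts es := by
        unfold calculate_counts_events_dashboard_alt
        dsimp only
        rw [← hl]
        set dB := l.foldl (fun d p => d.modify p.1 [] (· ++ [p.2]))
            (PySem.Dict.empty : PySem.Dict String (List Bool)) with hdB
        have hkB : dB.keys = PySem.Set.ofList ts := by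
          rw [hdB, PySem.Dict.keys_foldl_modify_key l Prod.fst, hmapfst, PySem.Dict.keys_empty]
          rfl
        have hndB : dB.keys.Nodup :=
          PySem.Dict.nodup_keys_foldl_modify_key l Prod.fst _ _ _ PySem.Dict.nodup_keys_empty
        rw [PySem.Dict.items_eq_map_keys dB hndB [], List.map_map, hkB]
        refine List.map_congr_left (fun t _ => ?_)
        have hg : dB.getD t [] = (l.filter (fun p => p.1 == t)).map (·.2) := by
          rw [hdB, PySem.Dict.getD_foldl_modify_append, PySem.Dict.getD_empty, List.nil_append]
        simp only [Function.comp_apply, hg, pv_sum_eq_countP, zero_add]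
        congr 1
        rw [List.countP_map, List.countP_filter]
        congr 1
        exact List.countP_congr (fun p _ => by cases hb : p.2 <;> simp [hb])

-- ===== VERDICT (by name: the statement is the Claim_ definition above) =====
theorem calculate_counts_events_dashboard_spec : Claim_equal_calculate_counts_events_dashboard := by
  intro ts es _ hpre
  unfold Spec_calculate_counts_events_dashboard
  exact pv_main ts es hpre
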